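-- pv_equiv track=rewrite | github.com/mojaeya/algorithm-gaepum | solve/0910_문자열 나누기/postforty/문자열 나누기.py | solution
-- ===== SOURCE A (Python) =====
-- def solution(s):
--     answer = 0
--     x = s[0]
--     count_x = 0
--     count_not_x = 0
--
--     for c in s:
--         if count_x != 0 and count_x == count_not_x:
--             answer += 1
--             count_x = 0
--             count_not_x = 0
--             x = c
--
--         count_x += 1 if x == c else 0
--         count_not_x += 1 if x != c else 0
--
--     answer += 1 if count_x != 0 or count_not_x != 0 else 0
--
--     return answer
-- ===== SOURCE B (Python) =====
-- def solution(s):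
--     # Recursive segment-stripping: find where the first segment ends, count it,
--     # and recurse on the remainder of the string.
--     if not s:
--         return 0
--     x = s[0]
--     diff = 0
--     for i, c in enumerate(s):
--         diff += 1 if c == x else -1
--         if diff == 0:
--             return 1 + solution(s[i + 1:])
--     return 1
-- ===== Notes on version B (the rewrite author's own statement) =====
-- stated objective: alternative
-- what changed: B replaces A's single-pass loop with two running counters and deferred segment closing by a recursive decomposition: scan only until the first segment's balance hits zero, then recurse on the sliced remainder of the string.
import Mathlib
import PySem

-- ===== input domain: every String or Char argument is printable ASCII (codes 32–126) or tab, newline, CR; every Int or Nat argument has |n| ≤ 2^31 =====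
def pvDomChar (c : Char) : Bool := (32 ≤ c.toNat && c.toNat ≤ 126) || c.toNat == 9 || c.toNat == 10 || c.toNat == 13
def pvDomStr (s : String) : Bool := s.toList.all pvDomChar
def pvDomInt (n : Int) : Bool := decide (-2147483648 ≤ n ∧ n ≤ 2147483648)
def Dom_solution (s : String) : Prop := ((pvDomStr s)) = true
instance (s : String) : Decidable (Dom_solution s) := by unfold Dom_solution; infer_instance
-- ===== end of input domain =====

-- B: recursive segment-stripping (scan the first segment, recurse on the rest) instead of
-- A's one-pass loop with two counters; alternative decomposition, similar cost.


-- ===== PORT A =====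
-- state: (answer, x, count_x, count_not_x)
def solutionStep (st : Int × Char × Int × Int) (c : Char) : Int × Char × Int × Int :=
  let st2 := if st.2.2.1 ≠ 0 ∧ st.2.2.1 = st.2.2.2
             then (st.1 + 1, c, (0 : Int), (0 : Int)) else st
  (st2.1, st2.2.1,
   st2.2.2.1 + (if st2.2.1 = c then 1 else 0),
   st2.2.2.2 + (if st2.2.1 ≠ c then 1 else 0))

def solution (s : String) : Int :=
  match PySem.Str.pyGet? s 0 with
  | none => 0   -- Python raises IndexError here; excluded by Pre_solution
  | some x0 =>
    let st := s.toList.foldl solutionStep (0, x0, 0, 0)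
    st.1 + (if st.2.2.1 ≠ 0 ∨ st.2.2.2 ≠ 0 then 1 else 0)

-- ===== PORT B =====
-- the for-loop with early return: index of the first position where diff hits 0, or none
def altFind (x : Char) : Int → List Char → Option Nat
  | _, [] => none
  | d, c :: t =>
    let d' := d + (if c = x then 1 else -1)
    if d' = 0 then some 0 else (altFind x d' t).map (· + 1)

def altGo : List Char → Int
  | [] => 0
  | x :: t =>
    match altFind x 0 (x :: t) with
    | none => 1
    | some i => 1 + altGo ((x :: t).drop (i + 1))   -- s[i+1:], nonnegative start
termination_by l => l.length
decreasing_by simp [List.length_drop]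

def solution_alt (s : String) : Int := altGo s.toList

-- ===== PRECONDITION & SPEC =====
-- Pre_ excludes exactly the empty string, on which A raises IndexError at s[0].
def Pre_solution (s : String) : Prop := s ≠ ""
instance (s : String) : Decidable (Pre_solution s) := by unfold Pre_solution; infer_instance
def pvWitness_solution : String := "aabbac"

def Spec_solution (s : String) (out : Int) : Prop := out = solution_alt s
instance (s : String) (out : Int) : Decidable (Spec_solution s out) := by unfold Spec_solution; infer_instance

-- ===== CLAIM =====
def Claim_equal_solution : Prop := ∀ (s : String), Dom_solution s → Pre_solution s → Spec_solution s (solution s)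

-- ===== LEMMAS AND PROOFS =====

-- Abstract version of A's per-character step on (answer, x, balance): once count_x ≥ 1,
-- A's behaviour depends only on the difference count_x - count_not_x.
def pvStep (st : Int × Char × Int) (c : Char) : Int × Char × Int :=
  if st.2.2 = 0 then (st.1 + 1, c, 1)
  else (st.1, st.2.1, st.2.2 + (if st.2.1 = c then 1 else -1))

theorem abs_fold (t : List Char) : ∀ (a : Int) (x : Char) (cx cnx : Int), 1 ≤ cx →
    (t.foldl pvStep (a, x, cx - cnx)).1 = (t.foldl solutionStep (a, x, cx, cnx)).1 ∧
    (t.foldl pvStep (a, x, cx - cnx)).2.1 = (t.foldl solutionStep (a, x, cx, cnx)).2.1 ∧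
    (t.foldl pvStep (a, x, cx - cnx)).2.2
      = (t.foldl solutionStep (a, x, cx, cnx)).2.2.1 - (t.foldl solutionStep (a, x, cx, cnx)).2.2.2 ∧
    1 ≤ (t.foldl solutionStep (a, x, cx, cnx)).2.2.1 := by
  induction t with
  | nil => intro a x cx cnx h; exact ⟨rfl, rfl, rfl, h⟩
  | cons c t ih =>
    intro a x cx cnx h
    simp only [List.foldl_cons]
    by_cases hd : cx = cnx
    · have h0 : cnx ≠ 0 := by omega
      have hA : solutionStep (a, x, cx, cnx) c = (a + 1, c, 1, 0) := by
        simp [solutionStep, hd, h0]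
      have hB : pvStep (a, x, cx - cnx) c = (a + 1, c, 1) := by
        simp [pvStep, hd]
      rw [hA, hB]
      have := ih (a + 1) c 1 0 (by omega)
      simpa using this
    · have hg : ¬(cx ≠ 0 ∧ cx = cnx) := by simp [hd]
      have hA : solutionStep (a, x, cx, cnx) c
          = (a, x, cx + (if x = c then 1 else 0), cnx + (if x ≠ c then 1 else 0)) := by
        simp [solutionStep, hg]
      have hz : cx - cnx ≠ 0 := by omega
      have hB : pvStep (a, x, cx - cnx) c
          = (a, x, (cx - cnx) + (if x = c then 1 else -1)) := by
        simp only [pvStep]; rw [if_neg hz]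
      rw [hA, hB]
      by_cases hc : x = c
      · have := ih a x (cx + 1) cnx (by omega)
        simpa [hc, (by omega : cx - cnx + 1 = cx + 1 - cnx)] using this
      · have := ih a x cx (cnx + 1) h
        simpa [hc, (by omega : cx - cnx + -1 = cx - (cnx + 1))] using this

theorem altGo_nil : altGo [] = 0 := by rw [altGo.eq_def]

theorem altGo_cons (x : Char) (t : List Char) :
    altGo (x :: t) = match altFind x 1 t with
      | none => 1
      | some i => 1 + altGo (t.drop (i + 1)) := by
  rw [altGo.eq_def]
  have h0 : altFind x 0 (x :: t) = (altFind x 1 t).map (· + 1) := by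
    simp [altFind]
  simp only [h0]
  cases altFind x 1 t <;> simp

-- Joint statement for the two mutually recursive facts, proved by strong induction on length.
def Mstmt (t : List Char) : Prop := ∀ (a : Int) (x : Char) (d : Int), d ≠ 0 →
    (t.foldl pvStep (a, x, d)).1 + 1
      = a + (match altFind x d t with
             | none => 1
             | some i => 1 + altGo (t.drop (i + 1)))

def Nstmt (t : List Char) : Prop := ∀ (a : Int) (x : Char),
    (t.foldl pvStep (a, x, 0)).1 + 1 = a + 1 + altGo t

theorem MN (n : Nat) : ∀ t : List Char, t.length ≤ n → Mstmt t ∧ Nstmt t := by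
  induction n with
  | zero =>
    intro t ht
    have : t = [] := List.length_eq_zero_iff.mp (Nat.le_zero.mp ht)
    subst this
    constructor
    · intro a x d _; simp [altFind]
    · intro a x; simp [altGo_nil]
  | succ n ih =>
    intro t ht
    cases t with
    | nil =>
      constructor
      · intro a x d _; simp [altFind]
      · intro a x; simp [altGo_nil]
    | cons c t' =>
      have ht' : t'.length ≤ n := by simpa using ht
      constructor
      · intro a x d hd
        simp only [List.foldl_cons]
        have hB : pvStep (a, x, d) c = (a, x, d + (if x = c then 1 else -1)) := by
          simp [pvStep, hd]
        rw [hB]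
        have hfind : altFind x d (c :: t') =
            (if d + (if c = x then 1 else -1) = 0 then some 0
             else (altFind x (d + (if c = x then 1 else -1)) t').map (· + 1)) := by
          simp [altFind]
        have hxc : (if x = c then (1:Int) else -1) = (if c = x then 1 else -1) := by
          by_cases h : x = c <;> simp [h, Ne.symm]
        rw [hxc]
        set d' := d + (if c = x then (1:Int) else -1) with hd'
        by_cases hz : d' = 0
        · rw [hz]
          have := (ih t' ht').2 a x
          rw [this, hfind, if_pos hz]
          simp [add_assoc]
        · have := (ih t' ht').1 a x d' hz
          rw [this, hfind, if_neg hz]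
          cases altFind x d' t' <;> simp
      · intro a x
        simp only [List.foldl_cons]
        have hB : pvStep (a, x, 0) c = (a + 1, c, 1) := by simp [pvStep]
        rw [hB]
        have := (ih t' ht').1 (a + 1) c 1 (by norm_num)
        rw [this, altGo_cons]

-- ===== VERDICT =====
theorem solution_spec : Claim_equal_solution := by
  intro s _ hpre
  unfold Spec_solution solution solution_alt
  cases hs : s.toList with
  | nil =>
    have hs0 : s = "" := by
      have h0 := congrArg String.ofList hs
      simpa using h0
    exact absurd hs0 hpre
  | cons x t =>
    have hget : PySem.Str.pyGet? s 0 = some x := by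
      have h := PySem.Str.pyGet?_natCast s 0
      rw [hs] at h; exact h
    rw [hget]
    simp only [List.foldl_cons]
    have hA1 : solutionStep (0, x, 0, 0) x = (0, x, 1, 0) := by
      simp [solutionStep]
    simp only [hA1]
    have habs := abs_fold t 0 x 1 0 (by norm_num)
    simp only [(by norm_num : (1:Int) - 0 = 1)] at habs
    obtain ⟨h1, _, h3, h4⟩ := habs
    have hfin : (t.foldl solutionStep (0, x, 1, 0)).1 +
        (if (t.foldl solutionStep (0, x, 1, 0)).2.2.1 ≠ 0 ∨
            (t.foldl solutionStep (0, x, 1, 0)).2.2.2 ≠ 0 then (1:Int) else 0)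
        = (t.foldl pvStep (0, x, 1)).1 + 1 := by
      rw [if_pos (Or.inl (by omega)), h1]
    rw [hfin]
    have hM := (MN t.length t le_rfl).1 0 x 1 (by norm_num)
    rw [hM, altGo_cons]
    cases altFind x 1 t <;> simp
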